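-- pv_equiv track=rewrite | github.com/KeatingLab/sortcery_design | 2016_11_09/workspace/getDNASeq_mp.py | getAlignmentsForBestMatch
-- ===== SOURCE A (Python) =====
-- def getAlignmentsForBestMatch(string1,string2):
--     #Sliding window matcher
--
--     extendedString1 = "."*len(string2)+string1+"."*len(string2);
--     extendedString2 = string2
--     counter=0
--     shiftArray=[]
--     #For all positions in the reference
--     for i in range(len(string1)+len(string2)):
--         counter = 0;
--         numCompared=0;
--
--         for j in range(len(extendedString2)):
--             if(extendedString2[j]=='.' or extendedString1[j]=='.'):
--                 counter+=0
--             elif(extendedString2[j]==extendedString1[j]):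
--                 counter+=1;
--                 numCompared+=1
--             else:
--                 numCompared+=1
--
--         #print extendedString1
--         #print extendedString2 , counter
--         #print '----------'
--         shiftArray.append((i-len(string2),counter,numCompared))
--         extendedString2 = "."+extendedString2;
--
--     return sorted(shiftArray,key = lambda x:x[1],reverse=True)
-- ===== SOURCE B (Python) =====
-- def getAlignmentsForBestMatch(string1, string2):
--     # Count, per shift, the aligned pairs once over the (a, b) pair space,
--     # instead of rescanning a growing dot-padded string per shift.
--     len1, len2 = len(string1), len(string2)
--     comparedShifts = [a - b for a, c1 in enumerate(string1) if c1 != '.'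
--                             for b, c2 in enumerate(string2) if c2 != '.']
--     matchShifts = [a - b for a, c1 in enumerate(string1) if c1 != '.'
--                          for b, c2 in enumerate(string2) if c2 != '.' and c1 == c2]
--     compared = {}
--     for s in comparedShifts:
--         compared[s] = compared.get(s, 0) + 1
--     matches = {}
--     for s in matchShifts:
--         matches[s] = matches.get(s, 0) + 1
--     shiftArray = [(s, matches.get(s, 0), compared.get(s, 0))
--                   for s in range(-len2, len1)]
--     return sorted(shiftArray, key=lambda x: x[1], reverse=True)
-- ===== Notes on version B (the rewrite author's own statement) =====
-- stated objective: alternative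
-- what changed: A slides a growing dot-padded copy of string2 along a padded string1 and rescans the full overlap window for every shift; B makes one pass over the (index1, index2) pair space, accumulating per-shift match and comparison counts in dicts, then emits the rows per shift directly.
import Mathlib
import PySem

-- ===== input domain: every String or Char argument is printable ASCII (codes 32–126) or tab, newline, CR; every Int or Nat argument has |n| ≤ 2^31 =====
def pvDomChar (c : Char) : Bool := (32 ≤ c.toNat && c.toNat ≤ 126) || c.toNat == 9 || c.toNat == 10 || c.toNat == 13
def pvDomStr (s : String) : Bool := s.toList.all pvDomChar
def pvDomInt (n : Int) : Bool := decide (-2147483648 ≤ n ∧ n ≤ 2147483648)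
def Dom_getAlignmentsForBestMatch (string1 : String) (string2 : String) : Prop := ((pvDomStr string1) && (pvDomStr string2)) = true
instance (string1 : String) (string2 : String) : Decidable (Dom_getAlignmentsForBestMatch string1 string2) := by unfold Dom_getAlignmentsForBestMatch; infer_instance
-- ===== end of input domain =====

-- B replaces A's per-shift rescan of a growing dot-padded string by one pass over the
-- (index1, index2) pair space that counts, per shift, compared and matching pairs in dicts
-- (objective: alternative decomposition, same asymptotic cost).

-- ===== PORT A =====
def getAlignmentsForBestMatch (string1 : String) (string2 : String) : List (Int × Int × Int) :=
  let l1 := string1.toList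
  let l2 := string2.toList
  -- extendedString1 = "."*len(string2)+string1+"."*len(string2)
  let ext1 := List.replicate l2.length '.' ++ l1 ++ List.replicate l2.length '.'
  -- the loop state is (extendedString2, shiftArray); counter/numCompared are reset each i
  let res :=
    (PySem.List.pyRange 0 ((l1.length : Int) + (l2.length : Int)) 1).foldl
      (fun (st : List Char × List (Int × Int × Int)) i =>
        let es2 := st.1
        let cn :=
          (PySem.List.pyRange 0 ((es2.length : Int)) 1).foldl
            (fun (cn : Int × Int) j =>
              -- extendedString2[j] / extendedString1[j]: always in range (j < len es2 ≤ len ext1),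
              -- so pyGetD with an arbitrary default is exact here
              if PySem.List.pyGetD es2 j '.' = '.' ∨ PySem.List.pyGetD ext1 j '.' = '.' then
                (cn.1 + 0, cn.2)
              else if PySem.List.pyGetD es2 j '.' = PySem.List.pyGetD ext1 j '.' then
                (cn.1 + 1, cn.2 + 1)
              else
                (cn.1, cn.2 + 1))
            (0, 0)
        ('.' :: es2, st.2 ++ [(i - (l2.length : Int), cn.1, cn.2)]))
      (l2, [])
  PySem.List.sorted res.2 (fun x => x.2.1) true

-- ===== PORT B =====
def getAlignmentsForBestMatch_alt (string1 : String) (string2 : String) : List (Int × Int × Int) :=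
  let l1 := string1.toList
  let l2 := string2.toList
  let comparedShifts :=
    (PySem.List.enumerate l1 0).flatMap (fun p =>
      if p.2 ≠ '.' then
        (PySem.List.enumerate l2 0).flatMap (fun q =>
          if q.2 ≠ '.' then [p.1 - q.1] else [])
      else [])
  let matchShifts :=
    (PySem.List.enumerate l1 0).flatMap (fun p =>
      if p.2 ≠ '.' then
        (PySem.List.enumerate l2 0).flatMap (fun q =>
          if q.2 ≠ '.' ∧ p.2 = q.2 then [p.1 - q.1] else [])
      else [])
  let compared := comparedShifts.foldl
    (fun (d : PySem.Dict Int Int) s => d.insert s (d.getD s 0 + 1)) PySem.Dict.empty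
  let matchd := matchShifts.foldl
    (fun (d : PySem.Dict Int Int) s => d.insert s (d.getD s 0 + 1)) PySem.Dict.empty
  let shiftArray := (PySem.List.pyRange (-(l2.length : Int)) ((l1.length : Int)) 1).map
      (fun s => (s, matchd.getD s 0, compared.getD s 0))
  PySem.List.sorted shiftArray (fun x => x.2.1) true

-- ===== PRECONDITION & SPEC =====
def Spec_getAlignmentsForBestMatch (string1 : String) (string2 : String) (out : List (Int × Int × Int)) : Prop := out = getAlignmentsForBestMatch_alt string1 string2
instance (string1 : String) (string2 : String) (out : List (Int × Int × Int)) : Decidable (Spec_getAlignmentsForBestMatch string1 string2 out) := by unfold Spec_getAlignmentsForBestMatch; infer_instance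

-- ===== CLAIM (what is proved, stated in full; the proofs are below) =====
def Claim_equal_getAlignmentsForBestMatch : Prop := ∀ (string1 : String) (string2 : String), Dom_getAlignmentsForBestMatch string1 string2 → Spec_getAlignmentsForBestMatch string1 string2 (getAlignmentsForBestMatch string1 string2)

-- ===== LEMMAS AND PROOFS =====

-- the per-pair indicator both counts reduce to: at shift s, left index a contributes 1
-- iff both indices are in range, neither character is '.', and (for eqReq) they are equal
def pvTerm (l1 l2 : List Char) (eqReq : Bool) (s a : Int) : Int :=
  if 0 ≤ a ∧ a < l1.length ∧ 0 ≤ a - s ∧ a - s < l2.length ∧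
     PySem.List.pyGetD l1 a '.' ≠ '.' ∧ PySem.List.pyGetD l2 (a - s) '.' ≠ '.' ∧
     (eqReq = true → PySem.List.pyGetD l1 a '.' = PySem.List.pyGetD l2 (a - s) '.')
  then 1 else 0

lemma pvTerm_support (l1 l2 : List Char) (eqReq : Bool) (s a : Int)
    (h : pvTerm l1 l2 eqReq s a ≠ 0) :
    0 ≤ a ∧ a < l1.length ∧ s ≤ a ∧ a < s + l2.length := by
  unfold pvTerm at h
  split_ifs at h with hc
  · obtain ⟨h1, h2, h3, h4, -⟩ := hc; omega
  · exact absurd rfl h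

lemma sum_pyRange_support (f : Int → Int) (a b lo hi : Int) (ha : a ≤ lo) (hb : hi ≤ b)
    (hlh : lo ≤ hi)
    (h : ∀ x, a ≤ x → x < b → (x < lo ∨ hi ≤ x) → f x = 0) :
    ((PySem.List.pyRange a b 1).map f).sum = ((PySem.List.pyRange lo hi 1).map f).sum := by
  rw [PySem.List.pyRange_one_append a lo b ha (le_trans hlh hb),
      PySem.List.pyRange_one_append lo hi b hlh hb]
  simp only [List.map_append, List.sum_append]
  have h1 : ((PySem.List.pyRange a lo 1).map f).sum = 0 := by
    apply List.sum_eq_zero; intro x hx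
    simp only [List.mem_map] at hx
    obtain ⟨y, hy, rfl⟩ := hx
    rw [PySem.List.mem_pyRange_one] at hy
    exact h y hy.1 (by omega) (Or.inl hy.2)
  have h2 : ((PySem.List.pyRange hi b 1).map f).sum = 0 := by
    apply List.sum_eq_zero; intro x hx
    simp only [List.mem_map] at hx
    obtain ⟨y, hy, rfl⟩ := hx
    rw [PySem.List.mem_pyRange_one] at hy
    exact h y (by omega) hy.2 (Or.inr hy.1)
  rw [h1, h2]; ring

lemma sum_pyRange_delta (f : Int → Int) (lo hi t : Int)
    (h : ∀ x, lo ≤ x → x < hi → x ≠ t → f x = 0) :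
    ((PySem.List.pyRange lo hi 1).map f).sum = if lo ≤ t ∧ t < hi then f t else 0 := by
  split_ifs with ht
  · rw [sum_pyRange_support f lo hi t (t + 1) ht.1 (by omega) (by omega)
        (fun x h1 h2 h3 => h x h1 h2 (by omega))]
    rw [PySem.List.pyRange_one_singleton]
    simp
  · apply List.sum_eq_zero; intro x hx
    simp only [List.mem_map] at hx
    obtain ⟨y, hy, rfl⟩ := hx
    rw [PySem.List.mem_pyRange_one] at hy
    exact h y hy.1 hy.2 (by omega)

lemma map_pyRange_shift {α : Type} (f : Int → α) (a b c : Int) :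
    (PySem.List.pyRange a b 1).map (fun x => f (x - c)) =
    (PySem.List.pyRange (a - c) (b - c) 1).map f := by
  rw [PySem.List.pyRange_one, PySem.List.pyRange_one]
  simp only [List.map_map]
  have : b - c - (a - c) = b - a := by ring
  rw [this]
  apply List.map_congr_left
  intro k _
  simp only [Function.comp_apply]
  congr 1
  ring

lemma sum_pyRange_shift (f : Int → Int) (a b c : Int) :
    ((PySem.List.pyRange a b 1).map (fun x => f (x - c))).sum =
    ((PySem.List.pyRange (a - c) (b - c) 1).map f).sum := by
  rw [map_pyRange_shift]

-- indexing into the dot-padded strings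
lemma pyGetD_replicate_append (k : Nat) (l : List Char) (j : Int) (h0 : 0 ≤ j)
    (h1 : j < (k : Int) + l.length) :
    PySem.List.pyGetD (List.replicate k '.' ++ l) j '.' =
      if (k : Int) ≤ j then PySem.List.pyGetD l (j - k) '.' else '.' := by
  split_ifs with hk
  · rw [PySem.List.pyGetD_eq_getElem _ _ h0 (by simp; omega),
        PySem.List.pyGetD_eq_getElem _ _ (by omega) (by omega)]
    rw [List.getElem_append_right (by simp; omega)]
    congr 1
    simp
  · rw [PySem.List.pyGetD_eq_getElem _ _ h0 (by simp; omega)]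
    rw [List.getElem_append_left (by simp; omega)]
    simp

lemma pyGetD_append_replicate (l : List Char) (k : Nat) (j : Int) (h0 : 0 ≤ j)
    (h1 : j < (l.length : Int) + k) :
    PySem.List.pyGetD (l ++ List.replicate k '.') j '.' =
      if j < (l.length : Int) then PySem.List.pyGetD l j '.' else '.' := by
  split_ifs with hk
  · rw [PySem.List.pyGetD_eq_getElem _ _ h0 (by simp; omega),
        PySem.List.pyGetD_eq_getElem _ _ h0 (by omega)]
    rw [List.getElem_append_left (by omega)]
  · rw [PySem.List.pyGetD_eq_getElem _ _ h0 (by simp; omega)]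
    rw [List.getElem_append_right (by omega)]
    simp

-- ===== A-side =====

-- the outer loop: at step i, extendedString2 = "."*i + string2, and one row is appended
lemma outerA {α : Type} (l2 : List Char) (row : List Char → Int → α) :
    ∀ (n k : Nat) (acc : List α),
    ((PySem.List.pyRange (k : Int) ((k : Int) + (n : Int)) 1).foldl
        (fun (st : List Char × List α) i => ('.' :: st.1, st.2 ++ [row st.1 i]))
        (List.replicate k '.' ++ l2, acc)).2
      = acc ++ (PySem.List.pyRange (k : Int) ((k : Int) + (n : Int)) 1).map
          (fun i => row (List.replicate i.toNat '.' ++ l2) i) := by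
  intro n
  induction n with
  | zero => intro k acc; rw [PySem.List.pyRange_one_eq_nil (by omega)]; simp
  | succ m ih =>
    intro k acc
    rw [PySem.List.pyRange_one_cons (by omega)]
    simp only [List.foldl_cons, List.map_cons]
    have hrep : '.' :: (List.replicate k '.' ++ l2) = List.replicate (k + 1) '.' ++ l2 := by
      simp [List.replicate_succ]
    have hcast : ((k : Int)) + 1 = ((k + 1 : Nat) : Int) := by push_cast; ring
    have hend : (k : Int) + ((m + 1 : Nat) : Int) = ((k + 1 : Nat) : Int) + (m : Nat) := by
      push_cast; ring
    rw [hrep, hcast, hend, ih (k + 1) (acc ++ [row (List.replicate k '.' ++ l2) (k : Int)])]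
    simp [Int.toNat_natCast]

-- one step of A's inner loop, as an Int indicator in the running index j
def pvU (l1 l2 : List Char) (i : Nat) (eqReq : Bool) (j : Int) : Int :=
  if PySem.List.pyGetD (List.replicate i '.' ++ l2) j '.' = '.' ∨
     PySem.List.pyGetD (List.replicate l2.length '.' ++ l1 ++ List.replicate l2.length '.') j '.' = '.' then 0
  else if eqReq = true then
    (if PySem.List.pyGetD (List.replicate i '.' ++ l2) j '.' =
        PySem.List.pyGetD (List.replicate l2.length '.' ++ l1 ++ List.replicate l2.length '.') j '.' then 1 else 0)
  else 1

lemma pvU_eq_term (l1 l2 : List Char) (i : Nat) (eqReq : Bool) (j : Int)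
    (hi : (i : Int) < (l1.length : Int) + l2.length)
    (hj0 : 0 ≤ j) (hj1 : j < (i : Int) + l2.length) :
    pvU l1 l2 i eqReq j = pvTerm l1 l2 eqReq ((i : Int) - l2.length) (j - l2.length) := by
  have hes2 : PySem.List.pyGetD (List.replicate i '.' ++ l2) j '.' =
      if (i : Int) ≤ j then PySem.List.pyGetD l2 (j - i) '.' else '.' :=
    pyGetD_replicate_append i l2 j hj0 (by push_cast; omega)
  have hext : PySem.List.pyGetD (List.replicate l2.length '.' ++ l1 ++ List.replicate l2.length '.') j '.' =
      if (l2.length : Int) ≤ j ∧ j < (l2.length : Int) + l1.length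
      then PySem.List.pyGetD l1 (j - l2.length) '.' else '.' := by
    rw [List.append_assoc,
        pyGetD_replicate_append l2.length (l1 ++ List.replicate l2.length '.') j hj0
          (by simp; push_cast; omega)]
    by_cases h1 : (l2.length : Int) ≤ j
    · rw [if_pos h1,
          pyGetD_append_replicate l1 l2.length (j - l2.length) (by omega) (by push_cast; omega)]
      by_cases h2 : j < (l2.length : Int) + l1.length
      · rw [if_pos (by omega), if_pos ⟨h1, h2⟩]
      · rw [if_neg (by omega), if_neg (by omega)]
    · rw [if_neg h1, if_neg (by omega)]
  unfold pvU pvTerm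
  rw [hes2, hext,
      show j - (l2.length : Int) - ((i : Int) - l2.length) = j - i from by ring]
  by_cases hA : (i : Int) ≤ j
  · rw [if_pos hA]
    by_cases hB : (l2.length : Int) ≤ j ∧ j < (l2.length : Int) + l1.length
    · rw [if_pos hB]
      by_cases hc2 : PySem.List.pyGetD l2 (j - i) '.' = '.'
      · rw [if_pos (Or.inl hc2), if_neg (fun h => h.2.2.2.2.2.1 hc2)]
      · by_cases hc1 : PySem.List.pyGetD l1 (j - l2.length) '.' = '.'
        · rw [if_pos (Or.inr hc1), if_neg (fun h => h.2.2.2.2.1 hc1)]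
        · rw [if_neg (by push Not; exact ⟨hc2, hc1⟩)]
          have hside : 0 ≤ j - (l2.length : Int) ∧ j - (l2.length : Int) < l1.length ∧
              0 ≤ j - (i : Int) ∧ j - (i : Int) < l2.length := by omega
          cases eqReq with
          | false =>
            rw [if_neg (show ¬((false : Bool) = true) by simp)]
            rw [if_pos ⟨hside.1, hside.2.1, hside.2.2.1, hside.2.2.2, hc1, hc2, by simp⟩]
          | true =>
            rw [if_pos rfl]
            by_cases heq : PySem.List.pyGetD l2 (j - i) '.' =
                PySem.List.pyGetD l1 (j - l2.length) '.'
            · rw [if_pos heq,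
                  if_pos ⟨hside.1, hside.2.1, hside.2.2.1, hside.2.2.2, hc1, hc2,
                    fun _ => heq.symm⟩]
            · rw [if_neg heq,
                  if_neg (fun h => heq (h.2.2.2.2.2.2 rfl).symm)]
    · rw [if_neg hB]
      rw [if_pos (Or.inr rfl), if_neg (fun h => by push_cast at hB; omega)]
  · rw [if_neg hA, if_pos (Or.inl rfl), if_neg (fun h => by omega)]

-- the inner loop at step i as two pair-indicator sums over the left positions
lemma innerA (l1 l2 : List Char) (i : Nat) (hi : (i : Int) < (l1.length : Int) + l2.length) :
    ((PySem.List.pyRange 0 (((List.replicate i '.' ++ l2).length : Int)) 1).foldl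
      (fun (cn : Int × Int) j =>
        if PySem.List.pyGetD (List.replicate i '.' ++ l2) j '.' = '.' ∨
           PySem.List.pyGetD (List.replicate l2.length '.' ++ l1 ++ List.replicate l2.length '.') j '.' = '.' then
          (cn.1 + 0, cn.2)
        else if PySem.List.pyGetD (List.replicate i '.' ++ l2) j '.' =
                PySem.List.pyGetD (List.replicate l2.length '.' ++ l1 ++ List.replicate l2.length '.') j '.' then
          (cn.1 + 1, cn.2 + 1)
        else
          (cn.1, cn.2 + 1))
      (0, 0))
    = (((PySem.List.pyRange 0 ((l1.length : Int)) 1).map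
          (pvTerm l1 l2 true ((i : Int) - l2.length))).sum,
       ((PySem.List.pyRange 0 ((l1.length : Int)) 1).map
          (pvTerm l1 l2 false ((i : Int) - l2.length))).sum) := by
  have hstep :
      (fun (cn : Int × Int) (j : Int) =>
        if PySem.List.pyGetD (List.replicate i '.' ++ l2) j '.' = '.' ∨
           PySem.List.pyGetD (List.replicate l2.length '.' ++ l1 ++ List.replicate l2.length '.') j '.' = '.' then
          (cn.1 + 0, cn.2)
        else if PySem.List.pyGetD (List.replicate i '.' ++ l2) j '.' =
                PySem.List.pyGetD (List.replicate l2.length '.' ++ l1 ++ List.replicate l2.length '.') j '.' then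
          (cn.1 + 1, cn.2 + 1)
        else
          (cn.1, cn.2 + 1))
      = (fun (cn : Int × Int) (j : Int) =>
          (cn.1 + pvU l1 l2 i true j, cn.2 + pvU l1 l2 i false j)) := by
    funext cn j
    by_cases hdot : PySem.List.pyGetD (List.replicate i '.' ++ l2) j '.' = '.' ∨
        PySem.List.pyGetD (List.replicate l2.length '.' ++ l1 ++ List.replicate l2.length '.') j '.' = '.'
    · rw [if_pos hdot]
      unfold pvU
      rw [if_pos hdot, if_pos hdot]
      simp
    · rw [if_neg hdot]
      unfold pvU
      rw [if_neg hdot, if_neg hdot, if_pos rfl,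
          if_neg (show ¬((false : Bool) = true) by simp)]
      by_cases heq : PySem.List.pyGetD (List.replicate i '.' ++ l2) j '.' =
          PySem.List.pyGetD (List.replicate l2.length '.' ++ l1 ++ List.replicate l2.length '.') j '.'
      · rw [if_pos heq, if_pos heq]
      · rw [if_neg heq, if_neg heq]
        simp
  rw [hstep]
  rw [show (fun (cn : Int × Int) (j : Int) =>
          (cn.1 + pvU l1 l2 i true j, cn.2 + pvU l1 l2 i false j))
        = (fun (cn : Int × Int) (j : Int) =>
          ((fun (c : Int) (j : Int) => c + pvU l1 l2 i true j) cn.1 j,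
           (fun (c : Int) (j : Int) => c + pvU l1 l2 i false j) cn.2 j)) from rfl]
  rw [PySem.List.foldl_prod_mk (fun (c : Int) (j : Int) => c + pvU l1 l2 i true j)
        (fun (c : Int) (j : Int) => c + pvU l1 l2 i false j)]
  rw [PySem.List.foldl_add, PySem.List.foldl_add]
  have hsum : ∀ eqReq : Bool,
      ((PySem.List.pyRange 0 (((List.replicate i '.' ++ l2).length : Int)) 1).map
        (pvU l1 l2 i eqReq)).sum
      = ((PySem.List.pyRange 0 ((l1.length : Int)) 1).map
          (pvTerm l1 l2 eqReq ((i : Int) - l2.length))).sum := by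
    intro eqReq
    have hlen : (((List.replicate i '.' ++ l2).length : Int)) = (i : Int) + l2.length := by
      simp
    rw [hlen]
    have hpt : ((PySem.List.pyRange 0 ((i : Int) + l2.length) 1).map (pvU l1 l2 i eqReq)).sum
        = ((PySem.List.pyRange 0 ((i : Int) + l2.length) 1).map
            (fun j => pvTerm l1 l2 eqReq ((i : Int) - l2.length) (j - l2.length))).sum := by
      refine congrArg List.sum (List.map_congr_left ?_)
      intro j hj
      rw [PySem.List.mem_pyRange_one] at hj
      exact pvU_eq_term l1 l2 i eqReq j hi hj.1 hj.2
    have hvan : ∀ x, (x < max 0 ((i : Int) - l2.length) ∨ min ((l1.length : Int)) ((i : Int)) ≤ x) →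
        pvTerm l1 l2 eqReq ((i : Int) - l2.length) x = 0 := by
      intro x hx
      by_contra hne
      have := pvTerm_support l1 l2 eqReq ((i : Int) - l2.length) x hne
      omega
    rw [hpt, sum_pyRange_shift (pvTerm l1 l2 eqReq ((i : Int) - l2.length)) 0
          ((i : Int) + l2.length) (l2.length : Int)]
    rw [sum_pyRange_support (pvTerm l1 l2 eqReq ((i : Int) - l2.length))
          (0 - (l2.length : Int)) ((i : Int) + l2.length - l2.length)
          (max 0 ((i : Int) - l2.length)) (min ((l1.length : Int)) ((i : Int)))
          (by omega) (by omega) (by omega) (fun x _ _ h3 => hvan x h3)]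
    rw [sum_pyRange_support (pvTerm l1 l2 eqReq ((i : Int) - l2.length))
          0 ((l1.length : Int))
          (max 0 ((i : Int) - l2.length)) (min ((l1.length : Int)) ((i : Int)))
          (by omega) (by omega) (by omega) (fun x _ _ h3 => hvan x h3)]
  rw [hsum true, hsum false]
  simp

-- one row of A's shiftArray, as a function of the current extendedString2
def pvRowA (l1 l2 : List Char) (es2 : List Char) (i : Int) : Int × Int × Int :=
  let cn :=
    (PySem.List.pyRange 0 ((es2.length : Int)) 1).foldl
      (fun (cn : Int × Int) j =>
        if PySem.List.pyGetD es2 j '.' = '.' ∨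
           PySem.List.pyGetD (List.replicate l2.length '.' ++ l1 ++ List.replicate l2.length '.') j '.' = '.' then
          (cn.1 + 0, cn.2)
        else if PySem.List.pyGetD es2 j '.' =
                PySem.List.pyGetD (List.replicate l2.length '.' ++ l1 ++ List.replicate l2.length '.') j '.' then
          (cn.1 + 1, cn.2 + 1)
        else
          (cn.1, cn.2 + 1))
      (0, 0)
  (i - (l2.length : Int), cn.1, cn.2)

-- the whole of A's pre-sort list
lemma A_list (s1 s2 : String) :
    (getAlignmentsForBestMatch s1 s2) =
    PySem.List.sorted
      ((PySem.List.pyRange (-(s2.toList.length : Int)) ((s1.toList.length : Int)) 1).map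
        (fun s => (s, ((PySem.List.pyRange 0 ((s1.toList.length : Int)) 1).map (pvTerm s1.toList s2.toList true s)).sum,
                      ((PySem.List.pyRange 0 ((s1.toList.length : Int)) 1).map (pvTerm s1.toList s2.toList false s)).sum)))
      (fun x => x.2.1) true := by
  have hrow := outerA (α := Int × Int × Int) s2.toList (pvRowA s1.toList s2.toList)
      (s1.toList.length + s2.toList.length) 0 []
  rw [List.nil_append] at hrow
  simp only [Nat.cast_add, Nat.cast_zero, zero_add] at hrow
  have hmap : (PySem.List.pyRange 0 ((s1.toList.length : Int) + (s2.toList.length : Int)) 1).map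
        (fun i => pvRowA s1.toList s2.toList (List.replicate i.toNat '.' ++ s2.toList) i)
      = (PySem.List.pyRange (-(s2.toList.length : Int)) ((s1.toList.length : Int)) 1).map
          (fun s => (s,
            ((PySem.List.pyRange 0 ((s1.toList.length : Int)) 1).map
              (pvTerm s1.toList s2.toList true s)).sum,
            ((PySem.List.pyRange 0 ((s1.toList.length : Int)) 1).map
              (pvTerm s1.toList s2.toList false s)).sum)) := by
    rw [List.map_congr_left (g := fun i => (fun s => (s,
            ((PySem.List.pyRange 0 ((s1.toList.length : Int)) 1).map
              (pvTerm s1.toList s2.toList true s)).sum,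
            ((PySem.List.pyRange 0 ((s1.toList.length : Int)) 1).map
              (pvTerm s1.toList s2.toList false s)).sum)) (i - (s2.toList.length : Int))) ?_]
    · rw [map_pyRange_shift (fun s => (s,
            ((PySem.List.pyRange 0 ((s1.toList.length : Int)) 1).map
              (pvTerm s1.toList s2.toList true s)).sum,
            ((PySem.List.pyRange 0 ((s1.toList.length : Int)) 1).map
              (pvTerm s1.toList s2.toList false s)).sum))
            0 ((s1.toList.length : Int) + (s2.toList.length : Int))
            ((s2.toList.length : Int)),
          show (0 : Int) - (s2.toList.length : Int) = -(s2.toList.length : Int) from by ring,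
          show (s1.toList.length : Int) + (s2.toList.length : Int) - (s2.toList.length : Int)
            = (s1.toList.length : Int) from by ring]
    · intro i hi
      rw [PySem.List.mem_pyRange_one] at hi
      have hi' : ((i.toNat : Nat) : Int) = i := Int.toNat_of_nonneg hi.1
      unfold pvRowA
      rw [innerA s1.toList s2.toList i.toNat (by rw [hi']; omega)]
      rw [hi']
  rw [hmap] at hrow
  exact congrArg (fun l => PySem.List.sorted l (fun x : Int × Int × Int => x.2.1) true) hrow

-- ===== B-side =====

lemma count_flatMap {α : Type} (l : List α) (f : α → List Int) (s : Int) :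
    ((l.flatMap f).count s : Int) = (l.map (fun x => ((f x).count s : Int))).sum := by
  induction l with
  | nil => simp
  | cons x xs ih => simp [List.flatMap_cons, List.count_append, ih]

lemma B_count (l1 l2 : List Char) (eqReq : Bool) (s : Int) :
    (((PySem.List.enumerate l1 0).flatMap (fun p =>
        if p.2 ≠ '.' then
          (PySem.List.enumerate l2 0).flatMap (fun q =>
            if q.2 ≠ '.' ∧ (eqReq = true → p.2 = q.2) then [p.1 - q.1] else [])
        else [])).count s : Int)
    = ((PySem.List.pyRange 0 ((l1.length : Int)) 1).map (pvTerm l1 l2 eqReq s)).sum := by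
  rw [count_flatMap, PySem.List.enumerate_eq_map_pyRange l1 '.', List.map_map]
  simp only [PySem.List.len_eq]
  refine congrArg List.sum ?_
  apply List.map_congr_left
  intro a ha
  rw [PySem.List.mem_pyRange_one] at ha
  simp only [Function.comp_apply]
  by_cases hc1 : PySem.List.pyGetD l1 a '.' = '.'
  · rw [if_neg (by simp [hc1])]
    unfold pvTerm
    rw [if_neg (by intro h; exact h.2.2.2.2.1 hc1)]
    simp
  · rw [if_pos (by simp [hc1])]
    rw [count_flatMap, PySem.List.enumerate_eq_map_pyRange l2 '.', List.map_map]
    simp only [PySem.List.len_eq]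
    rw [sum_pyRange_delta _ 0 (l2.length : Int) (a - s) ?_]
    · unfold pvTerm
      by_cases hr : 0 ≤ a - s ∧ a - s < (l2.length : Int)
      · rw [if_pos hr]
        simp only [Function.comp_apply]
        by_cases hc2 : PySem.List.pyGetD l2 (a - s) '.' ≠ '.' ∧
            (eqReq = true → PySem.List.pyGetD l1 a '.' = PySem.List.pyGetD l2 (a - s) '.')
        · rw [if_pos hc2]
          rw [if_pos ⟨ha.1, ha.2, hr.1, hr.2, hc1, hc2.1, hc2.2⟩]
          simp [show a - (a - s) = s from by ring]
        · rw [if_neg hc2]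
          rw [if_neg (by intro h; exact hc2 ⟨h.2.2.2.2.2.1, h.2.2.2.2.2.2⟩)]
          simp
      · rw [if_neg hr]
        rw [if_neg (by intro h; exact hr ⟨h.2.2.1, h.2.2.2.1⟩)]
    · intro b hb0 hb1 hbt
      simp only [Function.comp_apply]
      split_ifs with h
      · simp [List.count_cons]
        omega
      · simp

-- B's pre-sort list
lemma B_list (s1 s2 : String) :
    (getAlignmentsForBestMatch_alt s1 s2) =
    PySem.List.sorted
      ((PySem.List.pyRange (-(s2.toList.length : Int)) ((s1.toList.length : Int)) 1).map
        (fun s => (s, ((PySem.List.pyRange 0 ((s1.toList.length : Int)) 1).map (pvTerm s1.toList s2.toList true s)).sum,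
                      ((PySem.List.pyRange 0 ((s1.toList.length : Int)) 1).map (pvTerm s1.toList s2.toList false s)).sum)))
      (fun x => x.2.1) true := by
  have hm : ((PySem.List.enumerate s1.toList 0).flatMap (fun p =>
      if p.2 ≠ '.' then
        (PySem.List.enumerate s2.toList 0).flatMap (fun q =>
          if q.2 ≠ '.' ∧ p.2 = q.2 then [p.1 - q.1] else [])
      else []))
      = ((PySem.List.enumerate s1.toList 0).flatMap (fun p =>
      if p.2 ≠ '.' then
        (PySem.List.enumerate s2.toList 0).flatMap (fun q =>
          if q.2 ≠ '.' ∧ ((true : Bool) = true → p.2 = q.2) then [p.1 - q.1] else [])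
      else [])) := by
    simp
  have hf : ((PySem.List.enumerate s1.toList 0).flatMap (fun p =>
      if p.2 ≠ '.' then
        (PySem.List.enumerate s2.toList 0).flatMap (fun q =>
          if q.2 ≠ '.' then [p.1 - q.1] else [])
      else []))
      = ((PySem.List.enumerate s1.toList 0).flatMap (fun p =>
      if p.2 ≠ '.' then
        (PySem.List.enumerate s2.toList 0).flatMap (fun q =>
          if q.2 ≠ '.' ∧ ((false : Bool) = true → p.2 = q.2) then [p.1 - q.1] else [])
      else [])) := by
    simp
  have hlist : (PySem.List.pyRange (-(s2.toList.length : Int)) ((s1.toList.length : Int)) 1).map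
      (fun s => (s,
        (((PySem.List.enumerate s1.toList 0).flatMap (fun p =>
            if p.2 ≠ '.' then
              (PySem.List.enumerate s2.toList 0).flatMap (fun q =>
                if q.2 ≠ '.' ∧ p.2 = q.2 then [p.1 - q.1] else [])
            else [])).foldl
          (fun (d : PySem.Dict Int Int) s' => d.insert s' (d.getD s' 0 + 1)) PySem.Dict.empty).getD s 0,
        (((PySem.List.enumerate s1.toList 0).flatMap (fun p =>
            if p.2 ≠ '.' then
              (PySem.List.enumerate s2.toList 0).flatMap (fun q =>
                if q.2 ≠ '.' then [p.1 - q.1] else [])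
            else [])).foldl
          (fun (d : PySem.Dict Int Int) s' => d.insert s' (d.getD s' 0 + 1)) PySem.Dict.empty).getD s 0))
      = (PySem.List.pyRange (-(s2.toList.length : Int)) ((s1.toList.length : Int)) 1).map
          (fun s => (s,
            ((PySem.List.pyRange 0 ((s1.toList.length : Int)) 1).map
              (pvTerm s1.toList s2.toList true s)).sum,
            ((PySem.List.pyRange 0 ((s1.toList.length : Int)) 1).map
              (pvTerm s1.toList s2.toList false s)).sum)) := by
    apply List.map_congr_left
    intro s _
    rw [hm, hf, PySem.Dict.foldl_insert_getD_add_one_eq_counter,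
        PySem.Dict.foldl_insert_getD_add_one_eq_counter,
        PySem.Dict.getD_counter, PySem.Dict.getD_counter]
    rw [B_count s1.toList s2.toList true s, B_count s1.toList s2.toList false s]
  exact congrArg (fun l => PySem.List.sorted l (fun x : Int × Int × Int => x.2.1) true) hlist

-- ===== VERDICT (by name: the statement is the Claim_ definition above) =====
theorem getAlignmentsForBestMatch_spec : Claim_equal_getAlignmentsForBestMatch := by
  intro s1 s2 _
  unfold Spec_getAlignmentsForBestMatch
  rw [A_list, B_list]
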